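-- pv_equiv track=rewrite | github.com/momnpa333/baekjoon | gold/1300.py | makeseq
-- ===== SOURCE A (Python) =====
-- def makeseq(n):
--     seqary=[]
--     isum=0
--     for i in range(1,n+1):
--         isum+=i
--         col=i
--         row=1
--         seqary.append([row,col,isum])
--
--     for i in range(n-1,0,-1):
--         isum+=i
--         col=n
--         row=n-i+1
--         seqary.append([row,col,isum])
--     return seqary
-- ===== SOURCE B (Python) =====
-- def makeseq(n):
--     t = n * (n + 1) // 2
--     up = [[1, i, i * (i + 1) // 2] for i in range(1, n + 1)]
--     down = [[r, n, t + (n - 1) * n // 2 - (n - r) * (n - r + 1) // 2]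
--             for r in range(2, n + 1)]
--     return up + down
-- ===== Notes on version B (the rewrite author's own statement) =====
-- stated objective: simpler
-- what changed: Replaces A's two accumulator loops (running isum, mutated row/col variables) with two list comprehensions whose cumulative sums are closed-form triangular-number expressions, concatenated.
import Mathlib
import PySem

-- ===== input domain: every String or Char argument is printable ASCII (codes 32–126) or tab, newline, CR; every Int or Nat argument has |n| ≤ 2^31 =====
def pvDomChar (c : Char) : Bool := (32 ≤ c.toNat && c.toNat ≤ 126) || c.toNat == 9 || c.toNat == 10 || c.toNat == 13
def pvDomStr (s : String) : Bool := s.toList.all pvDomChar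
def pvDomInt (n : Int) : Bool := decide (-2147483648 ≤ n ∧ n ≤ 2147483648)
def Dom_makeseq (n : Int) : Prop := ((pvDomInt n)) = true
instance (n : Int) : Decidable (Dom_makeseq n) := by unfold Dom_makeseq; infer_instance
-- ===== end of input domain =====

-- B drops A's running accumulator: it builds the list as two comprehensions with
-- closed-form triangular sums (objective: simpler decomposition, same cost).

-- ===== PORT A =====
-- first loop body: isum += i; append [1, i, isum]
def stepA1 (acc : List (List Int) × Int) (i : Int) : List (List Int) × Int :=
  (acc.1 ++ [[1, i, acc.2 + i]], acc.2 + i)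
-- second loop body: isum += i; append [n-i+1, n, isum]
def stepA2 (n : Int) (acc : List (List Int) × Int) (i : Int) : List (List Int) × Int :=
  (acc.1 ++ [[n - i + 1, n, acc.2 + i]], acc.2 + i)

def makeseq (n : Int) : List (List Int) :=
  ((PySem.List.pyRange (n - 1) 0 (-1)).foldl (stepA2 n)
    ((PySem.List.pyRange 1 (n + 1) 1).foldl stepA1 ([], 0))).1

-- ===== PORT B =====
def makeseq_alt (n : Int) : List (List Int) :=
  let t := PySem.Int.floordiv (n * (n + 1)) 2
  ((PySem.List.pyRange 1 (n + 1) 1).map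
      (fun i => [1, i, PySem.Int.floordiv (i * (i + 1)) 2]))
  ++ ((PySem.List.pyRange 2 (n + 1) 1).map
      (fun r => [r, n, t + PySem.Int.floordiv ((n - 1) * n) 2
                        - PySem.Int.floordiv ((n - r) * (n - r + 1)) 2]))

-- ===== PRECONDITION & SPEC =====
def Spec_makeseq (n : Int) (out : List (List Int)) : Prop := out = makeseq_alt n
instance (n : Int) (out : List (List Int)) : Decidable (Spec_makeseq n out) := by unfold Spec_makeseq; infer_instance

-- ===== CLAIM (what is proved, stated in full; the proofs are below) =====
def Claim_equal_makeseq : Prop := ∀ (n : Int), Dom_makeseq n → Spec_makeseq n (makeseq n)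

-- ===== LEMMAS AND PROOFS =====

-- closed form for A's first loop: after folding range(1, k+1) the list is the
-- first comprehension of B and the accumulator is the k-th triangular number
theorem fold1_eq (k : Nat) :
    (PySem.List.pyRange 1 ((k : Int) + 1) 1).foldl stepA1 ([], 0)
      = ((PySem.List.pyRange 1 ((k : Int) + 1) 1).map
            (fun i => [1, i, PySem.Int.floordiv (i * (i + 1)) 2]),
         PySem.Int.floordiv ((k : Int) * ((k : Int) + 1)) 2) := by
  induction k with
  | zero => decide
  | succ k ih =>
      have h1 : (1 : Int) ≤ (k : Int) + 1 := by omega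
      have hr : PySem.List.pyRange 1 ((↑(k + 1) : Int) + 1) 1
          = PySem.List.pyRange 1 ((k : Int) + 1) 1 ++ [(k : Int) + 1] := by
        push_cast
        exact PySem.List.pyRange_one_succ_right h1
      rw [hr, List.foldl_append, ih, List.map_append]
      simp only [stepA1, List.foldl_cons, List.foldl_nil, List.map_cons, List.map_nil]
      have e1 : PySem.Int.floordiv ((k : Int) * ((k : Int) + 1)) 2
            = (k : Int) * ((k : Int) + 1) / 2 :=
        PySem.Int.floordiv_eq_ediv_of_pos (by omega)
      have e2 : PySem.Int.floordiv (((k : Int) + 1) * ((k : Int) + 1 + 1)) 2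
            = ((k : Int) + 1) * ((k : Int) + 1 + 1) / 2 :=
        PySem.Int.floordiv_eq_ediv_of_pos (by omega)
      have harith : PySem.Int.floordiv ((k : Int) * ((k : Int) + 1)) 2 + ((k : Int) + 1)
            = PySem.Int.floordiv (((k : Int) + 1) * ((k : Int) + 1 + 1)) 2 := by
        rw [e1, e2]
        have h2 : (k : Int) * ((k : Int) + 1) % 2 = 0 :=
          Int.even_iff.mp (Int.even_mul_succ_self (k : Int))
        have hprod : ((k : Int) + 1) * ((k : Int) + 1 + 1)
              = (k : Int) * ((k : Int) + 1) + 2 * ((k : Int) + 1) := by ring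
        rw [hprod]; omega
      push_cast
      rw [harith]

-- closed form for A's second loop: folding the countdown range(k, 0, -1) from a
-- list L and accumulator T(n)+T(n-1)-T(k) appends B's second comprehension rows
theorem fold2_eq (n : Int) (k : Nat) (L : List (List Int)) :
    (PySem.List.pyRange (k : Int) 0 (-1)).foldl (stepA2 n)
        (L, PySem.Int.floordiv (n * (n + 1)) 2 + PySem.Int.floordiv ((n - 1) * n) 2
              - PySem.Int.floordiv ((k : Int) * ((k : Int) + 1)) 2)
      = (L ++ (PySem.List.pyRange (n - (k : Int) + 1) (n + 1) 1).map
            (fun r => [r, n, PySem.Int.floordiv (n * (n + 1)) 2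
                              + PySem.Int.floordiv ((n - 1) * n) 2
                              - PySem.Int.floordiv ((n - r) * (n - r + 1)) 2]),
         PySem.Int.floordiv (n * (n + 1)) 2 + PySem.Int.floordiv ((n - 1) * n) 2) := by
  induction k generalizing L with
  | zero =>
      simp
  | succ k ih =>
      have hr1 : PySem.List.pyRange ((↑(k + 1) : Int)) 0 (-1)
          = (↑(k + 1) : Int) :: PySem.List.pyRange ((↑(k + 1) : Int) - 1) 0 (-1) :=
        PySem.List.pyRange_neg_one_cons (by push_cast; omega)
      have hc : ((↑(k + 1) : Int) - 1) = (k : Int) := by push_cast; omega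
      rw [hr1, List.foldl_cons, hc]
      have harith : PySem.Int.floordiv (n * (n + 1)) 2 + PySem.Int.floordiv ((n - 1) * n) 2
              - PySem.Int.floordiv ((↑(k + 1) : Int) * ((↑(k + 1) : Int) + 1)) 2
              + (↑(k + 1) : Int)
            = PySem.Int.floordiv (n * (n + 1)) 2 + PySem.Int.floordiv ((n - 1) * n) 2
              - PySem.Int.floordiv ((k : Int) * ((k : Int) + 1)) 2 := by
        have e1 : PySem.Int.floordiv ((↑(k + 1) : Int) * ((↑(k + 1) : Int) + 1)) 2
              = (↑(k + 1) : Int) * ((↑(k + 1) : Int) + 1) / 2 :=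
          PySem.Int.floordiv_eq_ediv_of_pos (by omega)
        have e2 : PySem.Int.floordiv ((k : Int) * ((k : Int) + 1)) 2
              = (k : Int) * ((k : Int) + 1) / 2 :=
          PySem.Int.floordiv_eq_ediv_of_pos (by omega)
        have h2 : (k : Int) * ((k : Int) + 1) % 2 = 0 :=
          Int.even_iff.mp (Int.even_mul_succ_self (k : Int))
        have hprod : (↑(k + 1) : Int) * ((↑(k + 1) : Int) + 1)
              = (k : Int) * ((k : Int) + 1) + 2 * ((k : Int) + 1) := by push_cast; ring
        rw [e1, e2, hprod]; push_cast; omega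
      have hstep : stepA2 n
            (L, PySem.Int.floordiv (n * (n + 1)) 2 + PySem.Int.floordiv ((n - 1) * n) 2
                  - PySem.Int.floordiv ((↑(k + 1) : Int) * ((↑(k + 1) : Int) + 1)) 2)
            (↑(k + 1) : Int)
          = (L ++ [[n - (↑(k + 1) : Int) + 1, n,
                PySem.Int.floordiv (n * (n + 1)) 2 + PySem.Int.floordiv ((n - 1) * n) 2
                  - PySem.Int.floordiv ((k : Int) * ((k : Int) + 1)) 2]],
             PySem.Int.floordiv (n * (n + 1)) 2 + PySem.Int.floordiv ((n - 1) * n) 2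
               - PySem.Int.floordiv ((k : Int) * ((k : Int) + 1)) 2) := by
        simp only [stepA2, harith]
      rw [hstep, ih (L ++ _)]
      have hrow : PySem.List.pyRange (n - (↑(k + 1) : Int) + 1) (n + 1) 1
          = (n - (↑(k + 1) : Int) + 1) :: PySem.List.pyRange (n - (k : Int) + 1) (n + 1) 1 := by
        have := PySem.List.pyRange_one_cons (a := n - (↑(k + 1) : Int) + 1) (b := n + 1) (by push_cast; omega)
        rw [this]
        congr 1
        push_cast; ring_nf
      rw [hrow, List.map_cons]
      have hval : (n - (n - (↑(k + 1) : Int) + 1)) = (k : Int) := by push_cast; ring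
      simp only [List.append_assoc, List.singleton_append, hval]

-- ===== VERDICT (by name: the statement is the Claim_ definition above) =====
theorem makeseq_spec : Claim_equal_makeseq := by
  intro n _
  show makeseq n = makeseq_alt n
  by_cases hn : n ≤ 0
  · have h1 : PySem.List.pyRange 1 (n + 1) 1 = [] := PySem.List.pyRange_one_eq_nil (by omega)
    have h2 : PySem.List.pyRange (n - 1) 0 (-1) = [] := PySem.List.pyRange_neg_one_eq_nil (by omega)
    have h3 : PySem.List.pyRange 2 (n + 1) 1 = [] := PySem.List.pyRange_one_eq_nil (by omega)
    simp [makeseq, makeseq_alt, h1, h2, h3]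
  · rw [Int.not_le] at hn
    obtain ⟨m, hm⟩ : ∃ m : Nat, (m : Int) = n := ⟨n.toNat, Int.toNat_of_nonneg (by omega)⟩
    obtain ⟨j, hj⟩ : ∃ j : Nat, (j : Int) = n - 1 := ⟨(n - 1).toNat, Int.toNat_of_nonneg (by omega)⟩
    subst hm
    unfold makeseq makeseq_alt
    have hrange : PySem.List.pyRange ((m : Int) - 1) 0 (-1)
        = PySem.List.pyRange ((j : Int)) 0 (-1) := by rw [hj]
    have hjj : ((j : Int)) * ((j : Int) + 1) = ((m : Int) - 1) * (m : Int) := by rw [hj]; ring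
    have hsum : PySem.Int.floordiv ((m : Int) * ((m : Int) + 1)) 2
        = PySem.Int.floordiv ((m : Int) * ((m : Int) + 1)) 2
          + PySem.Int.floordiv (((m : Int) - 1) * (m : Int)) 2
          - PySem.Int.floordiv ((j : Int) * ((j : Int) + 1)) 2 := by rw [hjj]; ring
    have htwo : (m : Int) - (j : Int) + 1 = 2 := by omega
    conv_lhs => rw [hrange, fold1_eq m, hsum, fold2_eq (m : Int) j, htwo]
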